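-- pv_equiv track=rewrite | github.com/whwnsgml48/nba_draft | src/utils/nba_data.py | get_player_position
-- ===== SOURCE A (Python) =====
-- def get_player_position(player_name: str) -> str:
--     """선수의 포지션 정보를 가져옵니다."""
--     # NBA API에서 포지션 정보를 직접 제공하지 않으므로
--     # 임시로 일반적인 포지션을 반환 (실제로는 추가 API나 데이터베이스 필요)
--     position_map = {
--         'C': ['Nikola Jokic', 'Joel Embiid', 'Karl-Anthony Towns'],
--         'PF': ['Giannis Antetokounmpo', 'Anthony Davis', 'Domantas Sabonis'],
--         'SF': ['Jayson Tatum', 'Kawhi Leonard', 'Jimmy Butler'],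
--         'SG': ['Devin Booker', 'Donovan Mitchell', 'Bradley Beal'],
--         'PG': ['Luka Doncic', 'Stephen Curry', 'Damian Lillard']
--     }
--
--     for position, players_list in position_map.items():
--         if player_name in players_list:
--             return position
--
--     return 'SF'  # 기본값
-- ===== SOURCE B (Python) =====
-- position_map = {
--     'C': ['Nikola Jokic', 'Joel Embiid', 'Karl-Anthony Towns'],
--     'PF': ['Giannis Antetokounmpo', 'Anthony Davis', 'Domantas Sabonis'],
--     'SF': ['Jayson Tatum', 'Kawhi Leonard', 'Jimmy Butler'],
--     'SG': ['Devin Booker', 'Donovan Mitchell', 'Bradley Beal'],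
--     'PG': ['Luka Doncic', 'Stephen Curry', 'Damian Lillard']
-- }
--
-- _player_to_position = {name: pos for pos, names in position_map.items() for name in names}
--
-- def get_player_position(player_name: str) -> str:
--     """선수의 포지션 정보를 가져옵니다."""
--     return _player_to_position.get(player_name, 'SF')
-- ===== Notes on version B (the rewrite author's own statement) =====
-- stated objective: idiomatic
-- what changed: Replaces the per-call loop over position lists with a precomputed reverse index from player name to position, looked up once with the same default.
import Mathlib
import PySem

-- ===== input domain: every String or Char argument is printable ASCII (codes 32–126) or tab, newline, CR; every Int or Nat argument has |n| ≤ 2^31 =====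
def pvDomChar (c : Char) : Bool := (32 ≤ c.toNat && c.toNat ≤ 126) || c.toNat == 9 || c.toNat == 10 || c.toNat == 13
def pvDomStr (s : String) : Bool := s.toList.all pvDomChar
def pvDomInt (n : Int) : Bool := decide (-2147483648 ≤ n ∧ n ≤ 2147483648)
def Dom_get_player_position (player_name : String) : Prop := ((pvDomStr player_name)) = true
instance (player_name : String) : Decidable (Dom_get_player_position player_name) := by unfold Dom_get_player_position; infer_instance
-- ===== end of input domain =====

-- B replaces A's per-call loop over position lists by a precomputed reverse index
-- (player name → position) looked up once with the same default (idiomatic; same values).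

-- ===== PORT A =====
def pvPositionMap : List (String × List String) :=
  [("C", ["Nikola Jokic", "Joel Embiid", "Karl-Anthony Towns"]),
   ("PF", ["Giannis Antetokounmpo", "Anthony Davis", "Domantas Sabonis"]),
   ("SF", ["Jayson Tatum", "Kawhi Leonard", "Jimmy Butler"]),
   ("SG", ["Devin Booker", "Donovan Mitchell", "Bradley Beal"]),
   ("PG", ["Luka Doncic", "Stephen Curry", "Damian Lillard"])]

-- the 'for position, players_list in position_map.items(): if player_name in players_list: return position' loop
def pvLoopA (player_name : String) : List (String × List String) → String
  | [] => "SF"  -- default after the loop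
  | (position, players_list) :: rest =>
      if players_list.contains player_name then position
      else pvLoopA player_name rest

def get_player_position (player_name : String) : String :=
  pvLoopA player_name pvPositionMap

-- ===== PORT B =====
-- the dict comprehension {name: pos for pos, names in position_map.items() for name in names}
def pvPlayerToPosition : PySem.Dict String String :=
  (pvPositionMap.flatMap (fun pn => pn.2.map (fun name => (name, pn.1)))).foldl
    (fun d nv => d.insert nv.1 nv.2) PySem.Dict.empty

def get_player_position_alt (player_name : String) : String :=
  pvPlayerToPosition.getD player_name "SF"

-- ===== PRECONDITION & SPEC =====
def Spec_get_player_position (player_name : String) (out : String) : Prop := out = get_player_position_alt player_name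
instance (player_name : String) (out : String) : Decidable (Spec_get_player_position player_name out) := by unfold Spec_get_player_position; infer_instance

-- ===== CLAIM (what is proved, stated in full; the proofs are below) =====
def Claim_equal_get_player_position : Prop := ∀ (player_name : String), Dom_get_player_position player_name → Spec_get_player_position player_name (get_player_position player_name)

-- ===== LEMMAS AND PROOFS =====

-- ===== VERDICT (by name: the statement is the Claim_ definition above) =====
theorem get_player_position_spec : Claim_equal_get_player_position := by
  intro n _
  unfold Spec_get_player_position get_player_position get_player_position_alt
  by_cases h1 : n = "Nikola Jokic"; · subst h1; decide
  by_cases h2 : n = "Joel Embiid"; · subst h2; decide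
  by_cases h3 : n = "Karl-Anthony Towns"; · subst h3; decide
  by_cases h4 : n = "Giannis Antetokounmpo"; · subst h4; decide
  by_cases h5 : n = "Anthony Davis"; · subst h5; decide
  by_cases h6 : n = "Domantas Sabonis"; · subst h6; decide
  by_cases h7 : n = "Jayson Tatum"; · subst h7; decide
  by_cases h8 : n = "Kawhi Leonard"; · subst h8; decide
  by_cases h9 : n = "Jimmy Butler"; · subst h9; decide
  by_cases h10 : n = "Devin Booker"; · subst h10; decide
  by_cases h11 : n = "Donovan Mitchell"; · subst h11; decide
  by_cases h12 : n = "Bradley Beal"; · subst h12; decide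
  by_cases h13 : n = "Luka Doncic"; · subst h13; decide
  by_cases h14 : n = "Stephen Curry"; · subst h14; decide
  by_cases h15 : n = "Damian Lillard"; · subst h15; decide
  simp only [pvLoopA, pvPositionMap, pvPlayerToPosition, PySem.Dict.getD, PySem.Dict.get?,
        PySem.Dict.insert, PySem.Dict.empty, List.flatMap, List.map,
        List.contains_cons, List.contains_nil, beq_iff_eq, Bool.or_false]
  simp [h1, h2, h3, h4, h5, h6, h7, h8, h9, h10, h11, h12, h13, h14, h15,
        Ne.symm h1, Ne.symm h2, Ne.symm h3, Ne.symm h4, Ne.symm h5, Ne.symm h6, Ne.symm h7,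
        Ne.symm h8, Ne.symm h9, Ne.symm h10, Ne.symm h11, Ne.symm h12, Ne.symm h13,
        Ne.symm h14, Ne.symm h15]
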